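-- pv_equiv track=rewrite | github.com/gilbutITbook/080338 | 8장/징검다리_건너기.py | solution
-- ===== SOURCE A (Python) =====
-- def available(n, stones, k):
--     skip = 0
--     for stone in stones:
--         if stone < n:
--             skip += 1
--             if skip >= k: return False
--         else: skip = 0
--     return True
--
-- def solution(stones, k):
--     start, end = 0, max(stones)
--     answer = 0
--     while start <= end:
--         mid = (start + end) // 2
--         if available(mid, stones, k):
--             start = mid + 1
--             answer = max(answer, mid)
--         else: end = mid - 1
--
--     return answer
-- ===== SOURCE B (Python) =====
-- def solution(stones, k):
--     n = len(stones)
--     if n < k: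
--         return max(0, max(stones))
--     best = min(max(stones[i:i + k]) for i in range(n - k + 1))
--     return max(0, best)
-- ===== Notes on version B (the rewrite author's own statement) =====
-- stated objective: simpler
-- what changed: Replaces A's binary search over the water level (each probe rescanning all stones for k consecutive too-low ones) with a direct computation: the answer is the minimum over all length-k windows of the window maximum, clamped to be nonnegative.
-- outside the precondition, e.g. on solution([3, -1], 0): A returns 0, B raises ValueError
import Mathlib
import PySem

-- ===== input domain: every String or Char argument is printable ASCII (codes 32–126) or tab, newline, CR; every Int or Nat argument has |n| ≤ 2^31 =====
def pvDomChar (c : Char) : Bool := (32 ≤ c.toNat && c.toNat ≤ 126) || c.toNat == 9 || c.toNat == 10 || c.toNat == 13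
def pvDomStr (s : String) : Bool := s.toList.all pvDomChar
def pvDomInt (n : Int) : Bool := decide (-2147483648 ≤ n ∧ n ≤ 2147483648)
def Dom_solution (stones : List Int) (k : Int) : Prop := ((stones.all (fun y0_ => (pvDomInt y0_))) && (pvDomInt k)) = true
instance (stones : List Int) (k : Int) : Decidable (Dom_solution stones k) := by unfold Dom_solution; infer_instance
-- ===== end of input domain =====

-- B replaces A's binary search over the water level by the direct computation
-- "minimum over all length-k windows of the window maximum, clamped at 0":
-- a simpler, loop-free formulation of the same value (return value only; A mutates nothing).


-- ===== PORT A =====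
def availableLoop (n k : Int) : List Int → Int → Bool
  | [], _ => true
  | stone :: rest, skip =>
    if stone < n then
      if skip + 1 ≥ k then false
      else availableLoop n k rest (skip + 1)
    else availableLoop n k rest 0

def available (n : Int) (stones : List Int) (k : Int) : Bool :=
  availableLoop n k stones 0

def bsearchLoop (stones : List Int) (k lo hi answer : Int) : Int :=
  if h : lo ≤ hi then
    let mid := PySem.Int.floordiv (lo + hi) 2
    if available mid stones k then
      bsearchLoop stones k (mid + 1) hi (max answer mid)
    else
      bsearchLoop stones k lo (mid - 1) answer
  else answer
termination_by (hi - lo + 1).toNat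
decreasing_by
  all_goals
    have hb := PySem.Int.floordiv_two_mid_bounds h
    omega

def solution (stones : List Int) (k : Int) : Int :=
  match PySem.List.max? stones (fun x => x) with
  | none => 0   -- Python raises ValueError at max(stones) on []; excluded by Pre_solution
  | some m => bsearchLoop stones k 0 m 0

-- ===== PORT B =====
def solution_alt (stones : List Int) (k : Int) : Int :=
  let n : Int := stones.length
  if n < k then
    max 0 ((PySem.List.max? stones (fun x => x)).getD 0)
  else
    max 0 (((PySem.List.pyRange 0 (n - k + 1) 1).map
        (fun i => (PySem.List.max? (PySem.List.slice stones (some i) (some (i + k)))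
                    (fun x => x)).getD 0)
      |> (PySem.List.min? · (fun x => x))).getD 0)

-- ===== PRECONDITION & SPEC =====
-- Pre_ excludes the empty list, on which A raises ValueError at max(stones), and k ≤ 0,
-- which is outside the natural domain of a window size (there A's returned value is an
-- artefact of its skip-counter test and B's max over an empty window raises ValueError).
def Pre_solution (stones : List Int) (k : Int) : Prop := stones ≠ [] ∧ 1 ≤ k
instance (stones : List Int) (k : Int) : Decidable (Pre_solution stones k) := by
  unfold Pre_solution; infer_instance

def pvWitness_solution : List Int × Int := ([2, 4, 5, 3, 2, 1, 4], 3)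

def Spec_solution (stones : List Int) (k : Int) (out : Int) : Prop := out = solution_alt stones k
instance (stones : List Int) (k : Int) (out : Int) : Decidable (Spec_solution stones k out) := by
  unfold Spec_solution; infer_instance

-- ===== CLAIM (what is proved, stated in full; the proofs are below) =====
def Claim_equal_solution : Prop := ∀ (stones : List Int) (k : Int), Dom_solution stones k → Pre_solution stones k → Spec_solution stones k (solution stones k)

-- ===== LEMMAS AND PROOFS =====

-- a "block" at Nat index i: k consecutive stones all below water level nlv
def Blk (nlv k : Int) (stones : List Int) (i : Nat) : Prop :=
  (i : Int) + k ≤ stones.length ∧ ∀ x ∈ (stones.drop i).take k.toNat, x < nlv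

lemma Blk_cons_succ (nlv k s : Int) (rest : List Int) (i : Nat) :
    Blk nlv k (s :: rest) (i + 1) ↔ Blk nlv k rest i := by
  unfold Blk
  simp only [List.drop_succ_cons, List.length_cons]
  constructor <;> rintro ⟨h1, h2⟩ <;> exact ⟨by push_cast at h1 ⊢; omega, h2⟩

-- A's scan with `skip` credit fails exactly on an all-small prefix of length k - skip
-- or an all-small block of length k anywhere
lemma availLoop_false_iff (nlv k : Int) :
    ∀ (l : List Int) (skip : Int), 0 ≤ skip → skip < k →
      (availableLoop nlv k l skip = false ↔
        ((k - skip ≤ l.length ∧ ∀ x ∈ l.take (k - skip).toNat, x < nlv)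
          ∨ ∃ i : Nat, Blk nlv k l i)) := by
  intro l
  induction l with
  | nil =>
    intro skip h0 hk
    constructor
    · intro h; simp [availableLoop] at h
    · rintro (⟨hlen, _⟩ | ⟨i, hB⟩)
      · simp at hlen; omega
      · obtain ⟨h1, _⟩ := hB; simp at h1; omega
  | cons s rest ih =>
    intro skip h0 hk
    by_cases hs : s < nlv
    · by_cases hstop : skip + 1 ≥ k
      · have hL : availableLoop nlv k (s :: rest) skip = false := by
          simp [availableLoop, hs, hstop]
        rw [hL]
        refine iff_of_true rfl (Or.inl ?_)
        have hk1 : k - skip = 1 := by omega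
        rw [hk1]
        refine ⟨by simp, ?_⟩
        intro x hx
        simp at hx
        simpa [hx] using hs
      · have hL : availableLoop nlv k (s :: rest) skip = availableLoop nlv k rest (skip + 1) := by
          simp [availableLoop, hs, hstop]
        have htake : (k - skip).toNat = (k - (skip + 1)).toNat + 1 := by omega
        rw [hL, ih (skip + 1) (by omega) (by omega)]
        constructor
        · rintro (⟨hlen, hall⟩ | ⟨i, hB⟩)
          · left
            refine ⟨by simp; omega, ?_⟩
            rw [htake, List.take_succ_cons]
            rintro x hx
            rcases List.mem_cons.1 hx with rfl | hx
            · exact hs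
            · exact hall x hx
          · exact Or.inr ⟨i + 1, (Blk_cons_succ nlv k s rest i).2 hB⟩
        · rintro (⟨hlen, hall⟩ | ⟨i, hB⟩)
          · left
            refine ⟨by simp at hlen; omega, ?_⟩
            intro x hx
            exact hall x (by rw [htake, List.take_succ_cons]; exact List.mem_cons_of_mem _ hx)
          · cases i with
            | zero =>
              left
              obtain ⟨hlen', hall'⟩ := hB
              simp only [List.drop_zero, List.length_cons] at hlen' hall'
              refine ⟨by simp; omega, ?_⟩
              intro x hx
              have hkt : k.toNat = (k.toNat - 1) + 1 := by omega
              apply hall'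
              rw [hkt, List.take_succ_cons]
              exact List.mem_cons_of_mem _ ((List.take_prefix_take_left (by omega : (k - (skip+1)).toNat ≤ k.toNat - 1)).subset hx)
            | succ j =>
              exact Or.inr ⟨j, (Blk_cons_succ nlv k s rest j).1 hB⟩
    · have hL : availableLoop nlv k (s :: rest) skip = availableLoop nlv k rest 0 := by
        simp [availableLoop, hs]
      rw [hL, ih 0 le_rfl (by omega)]
      have hkt : k.toNat = (k.toNat - 1) + 1 := by omega
      constructor
      · rintro (⟨hlen, hall⟩ | ⟨i, hB⟩)
        · refine Or.inr ⟨1, (Blk_cons_succ nlv k s rest 0).2 ?_⟩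
          exact ⟨by push_cast; omega, by simpa using hall⟩
        · exact Or.inr ⟨i + 1, (Blk_cons_succ nlv k s rest i).2 hB⟩
      · rintro (⟨hlen, hall⟩ | ⟨i, hB⟩)
        · exfalso
          apply hs
          apply hall
          have : (k - skip).toNat = ((k - skip).toNat - 1) + 1 := by omega
          rw [this, List.take_succ_cons]
          exact List.mem_cons_self ..
        · cases i with
          | zero =>
            exfalso
            apply hs
            apply hB.2
            simp only [List.drop_zero]
            rw [hkt, List.take_succ_cons]
            exact List.mem_cons_self ..
          | succ j =>
            exact Or.inr ⟨j, (Blk_cons_succ nlv k s rest j).1 hB⟩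

-- the level nlv is available iff every length-k window holds some stone ≥ nlv
lemma avail_true_iff (nlv : Int) (stones : List Int) (k : Int) (hk : 1 ≤ k) :
    (available nlv stones k = true ↔
      ∀ i : Nat, (i : Int) + k ≤ stones.length → ∃ x ∈ (stones.drop i).take k.toNat, nlv ≤ x) := by
  have hfalse := availLoop_false_iff nlv k stones 0 le_rfl (by omega)
  have hblk : availableLoop nlv k stones 0 = false ↔ ∃ i : Nat, Blk nlv k stones i := by
    rw [hfalse]
    constructor
    · rintro (⟨h1, h2⟩ | h)
      · refine ⟨0, ?_⟩
        simp only [sub_zero] at h1 h2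
        constructor
        · simpa using h1
        · simpa using h2
      · exact h
    · exact Or.inr
  unfold available
  rw [← Bool.not_eq_false, hblk]
  push_neg
  unfold Blk
  constructor
  · intro h i hi
    have := h i
    rw [not_and] at this
    have := this hi
    push_neg at this
    exact this
  · intro h i
    rw [not_and]
    intro hi
    push_neg
    exact h i hi

-- the binary-search loop against a threshold predicate
lemma bsearchLoop_eq (stones : List Int) (k T lo hi ans : Int)
    (hP : ∀ m, lo ≤ m → m ≤ hi → (available m stones k = true ↔ m ≤ T)) :
    bsearchLoop stones k lo hi ans =
      if lo ≤ hi then (if T < lo then ans else max ans (min T hi)) else ans := by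
  rw [bsearchLoop]
  by_cases h : lo ≤ hi
  · simp only [dif_pos h]
    have hb := PySem.Int.floordiv_two_mid_bounds h
    by_cases hav : available (PySem.Int.floordiv (lo + hi) 2) stones k = true
    · have hmT : PySem.Int.floordiv (lo + hi) 2 ≤ T := (hP _ hb.1 hb.2).1 hav
      simp only [hav, if_true]
      rw [bsearchLoop_eq stones k T _ hi _ (fun m h1 h2 => hP m (by omega) h2)]
      split_ifs <;> simp only [max_def, min_def] <;> split_ifs <;> omega
    · have hmT : T < PySem.Int.floordiv (lo + hi) 2 := by
        by_contra hc
        exact hav ((hP _ hb.1 hb.2).2 (by omega))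
      rw [if_neg hav]
      rw [bsearchLoop_eq stones k T lo _ ans (fun m h1 h2 => hP m h1 (by omega))]
      split_ifs <;> simp only [max_def, min_def] <;> split_ifs <;> omega
  · simp [h]
termination_by (hi - lo + 1).toNat
decreasing_by
  all_goals
    have hb := PySem.Int.floordiv_two_mid_bounds h
    omega

-- B's list of window maxima
def Lwin (stones : List Int) (k : Int) : List Int :=
  (PySem.List.pyRange 0 ((stones.length : Int) - k + 1) 1).map
    (fun i => (PySem.List.max? (PySem.List.slice stones (some i) (some (i + k)))
                (fun x => x)).getD 0)

lemma alt_eq (stones : List Int) (k : Int) :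
    solution_alt stones k =
      if (stones.length : Int) < k then max 0 ((PySem.List.max? stones (fun x => x)).getD 0)
      else max 0 ((PySem.List.min? (Lwin stones k) (fun x => x)).getD 0) := rfl

lemma window_eq (stones : List Int) (k i : Int) (h0 : 0 ≤ i) (hk : 0 ≤ k) :
    PySem.List.slice stones (some i) (some (i + k)) = (stones.drop i.toNat).take k.toNat := by
  rw [PySem.List.slice_toNat stones h0 (by omega)]
  congr 1
  omega

theorem main_eq (stones : List Int) (k : Int) (hne : stones ≠ []) (hk : 1 ≤ k) :
    solution stones k = solution_alt stones k := by
  obtain ⟨M, hM⟩ : ∃ M, PySem.List.max? stones (fun x => x) = some M := by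
    cases h : PySem.List.max? stones (fun x => x) with
    | none => exact absurd ((PySem.List.max?_eq_none_iff _ _).1 h) hne
    | some M => exact ⟨M, rfl⟩
  have hMmax : ∀ y ∈ stones, y ≤ M := fun y hy => PySem.List.max?_isMax hM y hy
  simp only [solution, hM]
  rw [alt_eq]
  by_cases hcase : (stones.length : Int) < k
  · have havail : ∀ m, available m stones k = true := by
      intro m
      rw [avail_true_iff m stones k hk]
      intro i hi
      exfalso
      have : (0 : Int) ≤ (i : Int) := by positivity
      omega
    rw [bsearchLoop_eq stones k M 0 M 0 (fun m h1 h2 => iff_of_true (havail m) h2), if_pos hcase, hM]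
    simp only [Option.getD_some]
    split_ifs <;> simp only [max_def, min_def] <;> split_ifs <;> omega
  · rw [if_neg hcase]
    push_neg at hcase
    have hLne : Lwin stones k ≠ [] := by
      unfold Lwin
      intro h
      have := congrArg List.length h
      simp [PySem.List.length_pyRange_one] at this
      omega
    obtain ⟨T, hT⟩ : ∃ T, PySem.List.min? (Lwin stones k) (fun x => x) = some T := by
      cases h : PySem.List.min? (Lwin stones k) (fun x => x) with
      | none => exact absurd ((PySem.List.min?_eq_none_iff _ _).1 h) hLne
      | some T => exact ⟨T, rfl⟩
    have hf : ∀ i : Int, 0 ≤ i → i + k ≤ (stones.length : Int) →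
        ∃ w, PySem.List.max? ((stones.drop i.toNat).take k.toNat) (fun x => x) = some w ∧
          (PySem.List.max? (PySem.List.slice stones (some i) (some (i + k)))
            (fun x => x)).getD 0 = w := by
      intro i h0 hik
      have hwne : (stones.drop i.toNat).take k.toNat ≠ [] := by
        intro hemp
        have := congrArg List.length hemp
        simp [List.length_take, List.length_drop] at this
        omega
      cases hw : PySem.List.max? ((stones.drop i.toNat).take k.toNat) (fun x => x) with
      | none => exact absurd ((PySem.List.max?_eq_none_iff _ _).1 hw) hwne
      | some w => exact ⟨w, rfl, by rw [window_eq stones k i h0 (by omega), hw, Option.getD_some]⟩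
    have key : ∀ m, available m stones k = true ↔ m ≤ T := by
      intro m
      rw [avail_true_iff m stones k hk]
      constructor
      · intro hall
        have hTmem := PySem.List.min?_mem hT
        obtain ⟨i0, hi0mem, hfi0⟩ := List.mem_map.1 hTmem
        have hi0 := PySem.List.mem_pyRange_one.1 hi0mem
        obtain ⟨w, hw, hfw⟩ := hf i0 hi0.1 (by omega)
        have hcast : ((i0.toNat : Nat) : Int) = i0 := Int.toNat_of_nonneg hi0.1
        obtain ⟨x, hx, hmx⟩ := hall i0.toNat (by omega)
        have hxw : x ≤ w := PySem.List.max?_isMax hw x hx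
        have : w = T := by rw [← hfi0, hfw]
        omega
      · intro hmT i hik
        have h0 : (0 : Int) ≤ (i : Int) := by positivity
        obtain ⟨w, hw, hfw⟩ := hf (i : Int) h0 (by omega)
        have hmem : (PySem.List.max? (PySem.List.slice stones (some (i : Int))
            (some ((i : Int) + k))) (fun x => x)).getD 0 ∈ Lwin stones k := by
          unfold Lwin
          exact List.mem_map.2 ⟨(i : Int), PySem.List.mem_pyRange_one.2 ⟨h0, by omega⟩, rfl⟩
        have hTle : T ≤ w := by
          have := PySem.List.min?_isMin hT _ hmem
          rw [hfw] at this
          exact this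
        have hwmem := PySem.List.max?_mem hw
        simp only [Int.toNat_natCast] at hwmem
        exact ⟨w, hwmem, by omega⟩
    have hTM : T ≤ M := by
      have hTmem := PySem.List.min?_mem hT
      obtain ⟨i0, hi0mem, hfi0⟩ := List.mem_map.1 hTmem
      have hi0 := PySem.List.mem_pyRange_one.1 hi0mem
      obtain ⟨w, hw, hfw⟩ := hf i0 hi0.1 (by omega)
      have hwmem := PySem.List.max?_mem hw
      have : w ∈ stones := List.take_subset _ _ (by exact hwmem) |> (List.drop_subset _ _)
      have := hMmax w this
      omega
    rw [bsearchLoop_eq stones k T 0 M 0 (fun m _ _ => key m), hT]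
    simp only [Option.getD_some]
    split_ifs <;> simp only [max_def, min_def] <;> split_ifs <;> omega

-- ===== VERDICT (by name: the statement is the Claim_ definition above) =====
theorem solution_spec : Claim_equal_solution := by
  intro stones k _ hpre
  unfold Spec_solution
  exact main_eq stones k hpre.1 hpre.2
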